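-- pv_equiv track=rewrite | github.com/miblazej/PIE | variant4.py | variant4
-- ===== SOURCE A (Python) =====
-- def variant4(A):
--     # Space: O(1)
--     # Time : O(N)
--     # Function description: Function that sorts boolean arrays without relative
--     # of True values at the end of the array
--     i = 0
--     stop = len(A)
--     while i < stop:
--         if A[i]:
--             A.append(A.pop(i))
--             stop -= 1
--             i -= 1
--         i += 1
--     return A
-- ===== SOURCE B (Python) =====
-- def variant4(A):
--     t = A.count(True)
--     A[:] = [False] * (len(A) - t) + [True] * t
--     return A
-- ===== Notes on version B (the rewrite author's own statement) =====
-- stated objective: faster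
-- what changed: Replaces the pop/append shuffling loop (each pop is linear) by counting the True values once and rebuilding the list as f Falses followed by t Trues in one pass.
import Mathlib
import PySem

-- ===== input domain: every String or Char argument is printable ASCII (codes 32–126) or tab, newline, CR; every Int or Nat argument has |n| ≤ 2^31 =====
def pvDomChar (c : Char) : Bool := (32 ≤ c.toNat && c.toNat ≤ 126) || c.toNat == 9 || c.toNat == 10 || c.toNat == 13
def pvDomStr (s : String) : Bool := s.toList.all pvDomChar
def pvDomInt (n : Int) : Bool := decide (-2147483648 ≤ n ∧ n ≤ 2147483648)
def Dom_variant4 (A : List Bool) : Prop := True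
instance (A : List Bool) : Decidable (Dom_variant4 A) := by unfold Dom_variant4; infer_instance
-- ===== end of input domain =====

-- B replaces A's quadratic pop/append shuffling loop by counting Trues and rebuilding it
-- as f Falses followed by t Trues in one pass (both mutate the argument in place in Python; return values proved equal).


-- ===== PORT A =====
-- the while loop of A: state is the (mutated) list, the index i and the shrinking bound stop
def variant4Loop (A : List Bool) (i stop : Int) : List Bool :=
  if _h : i < stop then
    match PySem.List.pyGet? A i with
    | some true =>
      match PySem.List.pop? A i with
      | some (x, rest) => variant4Loop (rest ++ [x]) (i - 1 + 1) (stop - 1)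
      | none => A        -- unreachable: pyGet? succeeded at the same index
    | some false => variant4Loop A (i + 1) stop
    | none => A           -- IndexError; unreachable from variant4's initial state
  else A
termination_by (stop - i).toNat
decreasing_by all_goals omega

def variant4 (A : List Bool) : List Bool := variant4Loop A 0 (A.length : Int)

-- ===== PORT B =====
def variant4_alt (A : List Bool) : List Bool :=
  let t := A.count true
  List.replicate (A.length - t) false ++ List.replicate t true

-- ===== PRECONDITION & SPEC =====
def Spec_variant4 (A : List Bool) (out : List Bool) : Prop := out = variant4_alt A
instance (A : List Bool) (out : List Bool) : Decidable (Spec_variant4 A out) := by unfold Spec_variant4; infer_instance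

-- ===== CLAIM (what is proved, stated in full; the proofs are below) =====
def Claim_equal_variant4 : Prop := ∀ (A : List Bool), Dom_variant4 A → Spec_variant4 A (variant4 A)

-- ===== LEMMAS AND PROOFS =====

lemma pop_at_prefix (pre : List Bool) (b : Bool) (rest : List Bool) :
    PySem.List.pop? (pre ++ b :: rest) ((pre.length : Int)) = some (b, pre ++ rest) := by
  have hlt : pre.length < (pre ++ b :: rest).length := by simp
  rw [PySem.List.pop?_natCast _ _ hlt]
  simp [List.getElem_append_right, List.eraseIdx_append_of_length_le]

lemma get_at_prefix (pre : List Bool) (b : Bool) (rest : List Bool) :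
    PySem.List.pyGet? (pre ++ b :: rest) ((pre.length : Int)) = some b := by
  simpa using PySem.List.pyGet?_append_length pre b rest

-- loop invariant: pre is the kept prefix, mid the unprocessed segment, post the moved Trues
lemma variant4Loop_eq (mid pre post : List Bool) :
    variant4Loop (pre ++ mid ++ post) (pre.length : Int) ((pre.length + mid.length : Nat) : Int)
      = pre ++ mid.filter (fun b => !b) ++ post ++ List.replicate (mid.count true) true := by
  induction mid generalizing pre post with
  | nil =>
    rw [variant4Loop]
    simp
  | cons b mid' ih =>
    rw [variant4Loop]
    have hlt : (pre.length : Int) < ((pre.length + (b :: mid').length : Nat) : Int) := by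
      simp only [List.length_cons]; push_cast; omega
    rw [dif_pos hlt]
    have hget : PySem.List.pyGet? (pre ++ (b :: mid') ++ post) ((pre.length : Int)) = some b := by
      rw [List.append_assoc]; exact get_at_prefix pre b (mid' ++ post)
    rw [hget]
    cases b with
    | false =>
      have h1 : pre ++ ([false] ++ mid') ++ post = (pre ++ [false]) ++ mid' ++ post := by
        simp
      have h2 : ((pre.length : Int)) + 1 = (((pre ++ [false]).length : Nat) : Int) := by
        simp
      have h3 : ((pre.length + (false :: mid').length : Nat) : Int)
          = (((pre ++ [false]).length + mid'.length : Nat) : Int) := by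
        simp only [List.length_cons, List.length_append, List.length_nil]; push_cast; omega
      show variant4Loop (pre ++ (false :: mid') ++ post) ((pre.length : Int) + 1) _ = _
      rw [show (pre ++ (false :: mid') ++ post) = (pre ++ [false]) ++ mid' ++ post by simp,
          h2, h3, ih]
      simp
    | true =>
      have hpop : PySem.List.pop? (pre ++ (true :: mid') ++ post) ((pre.length : Int))
          = some (true, pre ++ (mid' ++ post)) := by
        rw [List.append_assoc]; exact pop_at_prefix pre true (mid' ++ post)
      rw [hpop]
      have h2 : (pre.length : Int) - 1 + 1 = ((pre.length : Nat) : Int) := by omega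
      have h3 : ((pre.length + (true :: mid').length : Nat) : Int) - 1
          = ((pre.length + mid'.length : Nat) : Int) := by
        simp only [List.length_cons]; push_cast; omega
      show variant4Loop ((pre ++ (mid' ++ post)) ++ [true]) ((pre.length : Int) - 1 + 1) _ = _
      rw [h2, h3,
          show (pre ++ (mid' ++ post)) ++ [true] = pre ++ mid' ++ (post ++ [true]) by simp,
          ih]
      simp [List.count_cons, List.replicate_succ]

lemma filter_not_eq_replicate (A : List Bool) :
    A.filter (fun b => !b) = List.replicate (A.length - A.count true) false := by
  induction A with
  | nil => simp
  | cons b l ih =>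
    have hc := List.count_le_length (l := l) (a := true)
    cases b
    · rw [show (false :: l).length - (false :: l).count true = (l.length - l.count true) + 1 by
        simp [List.count_cons]; omega]
      simp [List.filter, ih, List.replicate_succ]
    · simp [List.filter, ih, List.count_cons]

-- ===== VERDICT (by name: the statement is the Claim_ definition above) =====
theorem variant4_spec : Claim_equal_variant4 := by
  intro A _
  unfold Spec_variant4 variant4 variant4_alt
  have h := variant4Loop_eq A [] []
  simp only [List.nil_append, List.append_nil, List.length_nil, Nat.zero_add, Nat.cast_zero] at h
  rw [h, filter_not_eq_replicate]
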